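-- pv_equiv track=rewrite | github.com/pypi-data/pypi-mirror-359 | packages/xbase-util/xbase_util-1.3.7.tar.gz/xbase_util-1.3.7/xbase_util/common_util.py | split_process
-- ===== SOURCE A (Python) =====
-- def split_process(subsection, process_count):
--     subsection_per_process = len(subsection) // process_count
--     remainder = len(subsection) % process_count
--     lengths = []
--     start = 0
--     for i in range(process_count):
--         end = start + subsection_per_process + (1 if i < remainder else 0)
--         lengths.append(end - start)
--         start = end
--     return lengths
-- ===== SOURCE B (Python) =====
-- def split_process(subsection, process_count):
--     base, remainder = divmod(len(subsection), process_count)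
--     return [base + 1] * remainder + [base] * (process_count - remainder)
-- ===== Notes on version B (the rewrite author's own statement) =====
-- stated objective: simpler
-- what changed: Replaces the per-index loop with a running start/end accumulator by a closed form: divmod once, then two homogeneous blocks built with list multiplication.
import Mathlib
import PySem

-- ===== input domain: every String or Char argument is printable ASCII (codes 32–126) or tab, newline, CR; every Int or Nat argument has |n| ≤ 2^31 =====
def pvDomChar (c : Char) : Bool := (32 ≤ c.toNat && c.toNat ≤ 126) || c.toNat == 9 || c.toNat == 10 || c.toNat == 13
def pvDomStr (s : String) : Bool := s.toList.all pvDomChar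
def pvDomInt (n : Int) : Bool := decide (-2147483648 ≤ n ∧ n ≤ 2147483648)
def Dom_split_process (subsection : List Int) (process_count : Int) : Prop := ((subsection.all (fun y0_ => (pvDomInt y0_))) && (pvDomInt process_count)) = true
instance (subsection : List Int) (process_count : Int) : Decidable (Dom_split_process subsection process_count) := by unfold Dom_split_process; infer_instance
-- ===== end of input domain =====

-- B replaces A's per-index loop (running start/end accumulator) by a closed form: one divmod, then two homogeneous blocks; objective: simpler.

-- ===== PORT A =====
def split_process (subsection : List Int) (process_count : Int) : List Int :=
  let subsection_per_process := PySem.Int.floordiv (subsection.length : Int) process_count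
  let remainder := PySem.Int.mod (subsection.length : Int) process_count
  let st := (PySem.List.pyRange 0 process_count 1).foldl
    (fun (s : List Int × Int) i =>
      let e := s.2 + subsection_per_process + (if i < remainder then 1 else 0)
      (s.1 ++ [e - s.2], e)) ([], 0)
  st.1

-- ===== PORT B =====
def split_process_alt (subsection : List Int) (process_count : Int) : List Int :=
  match PySem.Int.divmod? (subsection.length : Int) process_count with
  | none => []   -- process_count = 0: Python divmod raises; outside Pre_
  | some (base, remainder) =>
      -- Python list multiplication [x] * n ([] for n ≤ 0) = List.replicate n.toNat x
      List.replicate remainder.toNat (base + 1) ++ List.replicate (process_count - remainder).toNat base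

-- ===== PRECONDITION & SPEC =====
-- A raises ZeroDivisionError when process_count = 0 (so does B); exactly those inputs are excluded.
def Pre_split_process (subsection : List Int) (process_count : Int) : Prop := process_count ≠ 0
instance (subsection : List Int) (process_count : Int) : Decidable (Pre_split_process subsection process_count) := by unfold Pre_split_process; infer_instance
def pvWitness_split_process : List Int × Int := ([5, 2, 7, 1, 9], 3)

def Spec_split_process (subsection : List Int) (process_count : Int) (out : List Int) : Prop := out = split_process_alt subsection process_count
instance (subsection : List Int) (process_count : Int) (out : List Int) : Decidable (Spec_split_process subsection process_count out) := by unfold Spec_split_process; infer_instance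

-- ===== CLAIM (what is proved, stated in full; the proofs are below) =====
def Claim_equal_split_process : Prop := ∀ (subsection : List Int) (process_count : Int), Dom_split_process subsection process_count → Pre_split_process subsection process_count → Spec_split_process subsection process_count (split_process subsection process_count)

-- ===== LEMMAS AND PROOFS =====

-- A's loop, started from any accumulator/start, appends spp + (1 if i < rem else 0) for each i.
lemma split_loop (spp rem : Int) :
    ∀ (l : List Int) (acc : List Int) (start : Int),
      (l.foldl (fun (s : List Int × Int) i =>
          let e := s.2 + spp + (if i < rem then 1 else 0)
          (s.1 ++ [e - s.2], e)) (acc, start)).1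
        = acc ++ l.map (fun i => spp + (if i < rem then 1 else 0)) := by
  intro l
  induction l with
  | nil => intro acc start; simp
  | cons x xs ih =>
      intro acc start
      simp only [List.foldl_cons, List.map_cons]
      rw [ih]
      simp [List.append_assoc]
      ring_nf

lemma map_const_pyRange (a b c : Int) :
    (PySem.List.pyRange a b 1).map (fun _ => c) = List.replicate (b - a).toNat c := by
  rw [List.map_const']
  rw [PySem.List.length_pyRange_one]

theorem split_process_spec : Claim_equal_split_process := by
  intro subsection process_count _ hpre
  unfold Pre_split_process at hpre
  unfold Spec_split_process split_process split_process_alt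
  simp only []
  rw [split_loop]
  have hd : PySem.Int.divmod? (subsection.length : Int) process_count
      = some (PySem.Int.floordiv (subsection.length : Int) process_count,
              PySem.Int.mod (subsection.length : Int) process_count) := by
    simp [PySem.Int.divmod?, PySem.Int.floordiv, PySem.Int.mod, hpre]
  rw [hd]
  set spp := PySem.Int.floordiv (subsection.length : Int) process_count with hspp
  set rem := PySem.Int.mod (subsection.length : Int) process_count with hrem
  rcases lt_or_gt_of_ne hpre with hneg | hpos
  · -- process_count < 0 : both sides empty
    have hb := PySem.Int.mod_neg_bounds (a := (subsection.length : Int)) hneg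
    rw [PySem.List.pyRange_one_eq_nil (by omega)]
    have h1 : rem.toNat = 0 := by omega
    have h2 : (process_count - rem).toNat = 0 := by omega
    simp [h1, h2]
  · -- process_count > 0 : split the range at rem
    have h0 : (0:Int) ≤ rem := PySem.Int.mod_nonneg _ hpos
    have h1 : rem < process_count := PySem.Int.mod_lt _ hpos
    rw [PySem.List.pyRange_one_append 0 rem process_count h0 (le_of_lt h1)]
    rw [List.map_append]
    have e1 : (PySem.List.pyRange 0 rem 1).map (fun i => spp + (if i < rem then 1 else 0))
        = List.replicate rem.toNat (spp + 1) := by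
      rw [List.map_congr_left (g := fun _ => spp + 1) ?_, map_const_pyRange]
      · simp
      · intro i hi
        rw [PySem.List.mem_pyRange_one] at hi
        simp [hi.2]
    have e2 : (PySem.List.pyRange rem process_count 1).map (fun i => spp + (if i < rem then 1 else 0))
        = List.replicate (process_count - rem).toNat spp := by
      rw [List.map_congr_left (g := fun _ => spp) ?_, map_const_pyRange]
      · intro i hi
        rw [PySem.List.mem_pyRange_one] at hi
        simp [not_lt.mpr hi.1]
    rw [e1, e2]
    simp
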